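-- pv_equiv track=rewrite | github.com/madaha555/GEO_dataset_analysis | GEO_information_parse/geo_parse_v3.py | get_dataset_author_name
-- ===== SOURCE A (Python) =====
-- def get_dataset_author_name(x):
-- 	first=""
-- 	middle=""
-- 	last=""
-- 	if x == '':
-- 		return ""
-- 	names=x.split("; ")
-- 	for name in names:
-- 		if name.startswith("First:"):
-- 			first=name.split(":")[1].strip(";")
-- 		if name.startswith("Last:"):
-- 			last=name.split(":")[1].strip(";")
-- 		if name.startswith("Middle:"):
-- 			middle=name.split(":")[1].strip(";")
-- 	if middle!="":
-- 		return last+", "+first+" "+middle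
-- 	else:
-- 		return last+", "+first
-- ===== SOURCE B (Python) =====
-- def get_dataset_author_name(x):
--     if x == '':
--         return ""
--     rev = x.split("; ")[::-1]
--
--     def pick(prefix):
--         # last occurrence wins in A == first match scanning from the end
--         for part in rev:
--             if part.startswith(prefix):
--                 return part.split(":")[1].strip(";")
--         return ""
--
--     first = pick("First:")
--     middle = pick("Middle:")
--     last = pick("Last:")
--     if middle != "":
--         return last + ", " + first + " " + middle
--     return last + ", " + first
-- ===== Notes on version B (the rewrite author's own statement) =====
-- stated objective: alternative
-- what changed: Replaces A's single forward fold over three accumulator variables with three staged early-exit searches over the reversed part list (first match from the end = A's last-assignment-wins), so no per-part accumulation happens at all.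
import Mathlib
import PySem

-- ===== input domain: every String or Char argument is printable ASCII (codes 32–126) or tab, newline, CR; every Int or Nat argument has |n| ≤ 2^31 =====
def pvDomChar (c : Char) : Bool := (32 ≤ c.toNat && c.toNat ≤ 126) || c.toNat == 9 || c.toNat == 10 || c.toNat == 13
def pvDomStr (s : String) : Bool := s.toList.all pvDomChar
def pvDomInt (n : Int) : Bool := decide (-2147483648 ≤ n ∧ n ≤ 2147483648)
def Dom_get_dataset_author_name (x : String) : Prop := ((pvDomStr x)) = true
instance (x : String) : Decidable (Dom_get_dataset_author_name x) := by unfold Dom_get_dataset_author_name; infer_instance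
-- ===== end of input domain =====

-- B replaces A's single forward fold over three accumulators with three staged
-- early-exit searches over the reversed part list (first match from the end).

-- s.split(sep) for a non-empty literal sep: split? is some there, so getD [] is exact.
def pvSplit (s sep : String) : List String :=
  (PySem.Str.split? s sep).getD []

-- name.split(":")[1].strip(";"): the [1] is only reached under a startswith guard that
-- guarantees ":" occurs, so pyGetD's default "" is never used (exact on all reached inputs).
def pvExtract (name : String) : String :=
  PySem.Str.stripChars (PySem.List.pyGetD (pvSplit name ":") 1 "") ";"

-- ===== PORT A =====
def get_dataset_author_name (x : String) : String :=
  if x == "" then ""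
  else
    let names := pvSplit x "; "
    let s : String × String × String := names.foldl (fun (acc : String × String × String) name =>
      let f := if PySem.Str.startswith name "First:" then pvExtract name else acc.1
      let l := if PySem.Str.startswith name "Last:" then pvExtract name else acc.2.2
      let m := if PySem.Str.startswith name "Middle:" then pvExtract name else acc.2.1
      (f, m, l)) ("", "", "")
    if s.2.1 != "" then s.2.2 ++ ", " ++ s.1 ++ " " ++ s.2.1
    else s.2.2 ++ ", " ++ s.1

-- ===== PORT B =====
-- pick: first part (scanning the given list) that startswith the prefix, extracted; "" if none.
def pvPick (pre : String) : List String → String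
  | [] => ""
  | p :: ps => if PySem.Str.startswith p pre then pvExtract p else pvPick pre ps

def get_dataset_author_name_alt (x : String) : String :=
  if x == "" then ""
  else
    let rev := (pvSplit x "; ").reverse
    let first := pvPick "First:" rev
    let middle := pvPick "Middle:" rev
    let last := pvPick "Last:" rev
    if middle != "" then last ++ ", " ++ first ++ " " ++ middle
    else last ++ ", " ++ first

-- ===== PRECONDITION & SPEC =====
def Spec_get_dataset_author_name (x : String) (out : String) : Prop := out = get_dataset_author_name_alt x
instance (x : String) (out : String) : Decidable (Spec_get_dataset_author_name x out) := by unfold Spec_get_dataset_author_name; infer_instance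

-- ===== CLAIM (what is proved, stated in full; the proofs are below) =====
def Claim_equal_get_dataset_author_name : Prop := ∀ (x : String), Dom_get_dataset_author_name x → Spec_get_dataset_author_name x (get_dataset_author_name x)

-- ===== LEMMAS AND PROOFS =====

-- pvPick with a fallback value when nothing matches (what A's fold threads through)
def pvPickA (pre : String) (a : String) : List String → String
  | [] => a
  | p :: ps => if PySem.Str.startswith p pre then pvExtract p else pvPickA pre a ps

theorem pvPickA_append (pre a : String) (xs ys : List String) :
    pvPickA pre a (xs ++ ys) = pvPickA pre (pvPickA pre a ys) xs := by
  induction xs with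
  | nil => simp [pvPickA]
  | cons p ps ih => simp [pvPickA, ih]

theorem pvPickA_nil_default (pre : String) (l : List String) :
    pvPickA pre "" l = pvPick pre l := by
  induction l with
  | nil => rfl
  | cons p ps ih => simp [pvPickA, pvPick, ih]

-- A's triple fold equals the three reversed first-match searches with the init as fallback
theorem pv_fold_eq_pick (l : List String) (f m la : String) :
    l.foldl (fun (acc : String × String × String) name =>
      let f := if PySem.Str.startswith name "First:" then pvExtract name else acc.1
      let l := if PySem.Str.startswith name "Last:" then pvExtract name else acc.2.2
      let m := if PySem.Str.startswith name "Middle:" then pvExtract name else acc.2.1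
      (f, m, l)) (f, m, la)
    = (pvPickA "First:" f l.reverse, pvPickA "Middle:" m l.reverse, pvPickA "Last:" la l.reverse) := by
  induction l generalizing f m la with
  | nil => simp [pvPickA]
  | cons n ns ih =>
    simp only [List.foldl_cons, List.reverse_cons, pvPickA_append]
    rw [ih]
    simp only [pvPickA]

-- ===== VERDICT (by name: the statement is the Claim_ definition above) =====
theorem get_dataset_author_name_spec : Claim_equal_get_dataset_author_name := by
  intro x _
  unfold Spec_get_dataset_author_name get_dataset_author_name get_dataset_author_name_alt
  by_cases hx : x == ""
  · simp [hx]
  · simp only [hx, Bool.false_eq_true, if_false]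
    rw [pv_fold_eq_pick]
    simp [pvPickA_nil_default]
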